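-- pv_equiv track=rewrite | github.com/DavidLesnjak/MX_Device_Generator_PoC | MX_Device_Generator_PoC.py | create_define
-- ===== SOURCE A (Python) =====
-- def create_define(name, value):
--     invalid_chars = ['=', ' ', '/', '(', ')', '[', ']', '\\', '-']
--
--     for ch in invalid_chars:
--         name = name.replace(ch, '_')
--         value =value.replace(ch, '_')
--
--     name = f"MX_{name}"
--     name = name.ljust(39)
--     define = f"#define {name}{value}"
--
--     return define
-- ===== SOURCE B (Python) =====
-- def create_define(name, value):
--     invalid = set('= /()[]\\-')
--     name = ''.join('_' if c in invalid else c for c in name)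
--     value = ''.join('_' if c in invalid else c for c in value)
--     return f"#define {('MX_' + name).ljust(39)}{value}"
-- ===== Notes on version B (the rewrite author's own statement) =====
-- stated objective: simpler
-- what changed: Replaces nine sequential full-string .replace scans (one per invalid character, rebuilding both strings each time) by one single character-level pass per string with a set membership test.
import Mathlib
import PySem

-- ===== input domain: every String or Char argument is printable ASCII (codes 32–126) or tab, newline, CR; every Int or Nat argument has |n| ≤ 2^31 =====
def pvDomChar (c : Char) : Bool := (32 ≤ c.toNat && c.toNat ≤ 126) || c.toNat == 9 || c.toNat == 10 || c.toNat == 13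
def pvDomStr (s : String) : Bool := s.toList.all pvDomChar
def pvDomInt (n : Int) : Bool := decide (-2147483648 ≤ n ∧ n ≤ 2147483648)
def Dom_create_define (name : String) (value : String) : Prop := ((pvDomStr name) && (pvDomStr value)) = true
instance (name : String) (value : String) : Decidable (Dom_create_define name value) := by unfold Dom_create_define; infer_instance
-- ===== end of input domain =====

-- B replaces A's nine sequential full-string replace scans by one character-level
-- pass per string with a set membership test (objective: simpler).

-- ===== PORT A =====
-- A's str.replace(ch, '_') on a 1-char pattern, via PySem.Chars.replace (exact);
-- ljust(39) pads with spaces on the right (exact for ASCII).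
def create_define (name : String) (value : String) : String :=
  let invalid_chars : List Char := ['=', ' ', '/', '(', ')', '[', ']', '\\', '-']
  let p := invalid_chars.foldl
    (fun (p : List Char × List Char) ch =>
      (PySem.Chars.replace p.1 [ch] ['_'], PySem.Chars.replace p.2 [ch] ['_']))
    (name.toList, value.toList)
  let n := "MX_".toList ++ p.1                 -- f"MX_{name}"
  let n := n ++ List.replicate (39 - n.length) ' '  -- name.ljust(39)
  String.mk ("#define ".toList ++ n ++ p.2)    -- f"#define {name}{value}"

-- ===== PORT B =====
-- ''.join('_' if c in invalid else c for c in s): one map over the characters.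
def pvSanitize (invalid : PySem.Set Char) (cs : List Char) : List Char :=
  cs.map (fun c => if invalid.contains c then '_' else c)

def create_define_alt (name : String) (value : String) : String :=
  let invalid : PySem.Set Char := PySem.Set.ofList ['=', ' ', '/', '(', ')', '[', ']', '\\', '-']
  let n := pvSanitize invalid name.toList
  let v := pvSanitize invalid value.toList
  let padded := "MX_".toList ++ n
  let padded := padded ++ List.replicate (39 - padded.length) ' '
  String.mk ("#define ".toList ++ padded ++ v)

-- ===== PRECONDITION & SPEC =====
def Spec_create_define (name : String) (value : String) (out : String) : Prop := out = create_define_alt name value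
instance (name : String) (value : String) (out : String) : Decidable (Spec_create_define name value out) := by unfold Spec_create_define; infer_instance

-- ===== CLAIM (what is proved, stated in full; the proofs are below) =====
def Claim_equal_create_define : Prop := ∀ (name : String) (value : String), Dom_create_define name value → Spec_create_define name value (create_define name value)

-- ===== LEMMAS AND PROOFS =====

-- replace with a single-character pattern is a map over the characters
theorem replace_go_single (c : Char) :
    ∀ (fuel : Nat) (l acc : List Char), l.length ≤ fuel →
      PySem.Chars.replace.go [c] ['_'] fuel l acc =
        acc.reverse ++ l.map (fun x => if x = c then '_' else x) := by
  intro fuel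
  induction fuel with
  | zero =>
    intro l acc h
    have : l = [] := List.eq_nil_of_length_eq_zero (Nat.le_zero.mp h)
    subst this; simp [PySem.Chars.replace.go]
  | succ f ih =>
    intro l acc h
    cases l with
    | nil => simp [PySem.Chars.replace.go]
    | cons x t =>
      simp only [PySem.Chars.replace.go]
      by_cases hx : x = c
      · subst hx
        have hpre : List.isPrefixOf [x] (x :: t) = true := by
          simp [List.isPrefixOf]
        rw [hpre]
        simp only [if_true, List.length_cons, List.length_nil, List.drop_succ_cons,
          List.drop_zero, List.reverse_singleton, List.singleton_append, List.map_cons,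
          if_pos rfl]
        rw [ih t ('_' :: acc) (by simpa using Nat.le_of_succ_le_succ h)]
        simp
      · have hpre : List.isPrefixOf [c] (x :: t) = false := by
          simp [List.isPrefixOf, Ne.symm hx]
        rw [hpre]
        simp only [Bool.false_eq_true, if_false, if_neg hx, List.map_cons]
        rw [ih t (x :: acc) (by simpa using Nat.le_of_succ_le_succ h)]
        simp

theorem replace_single (c : Char) (cs : List Char) :
    PySem.Chars.replace cs [c] ['_'] = cs.map (fun x => if x = c then '_' else x) := by
  rw [PySem.Chars.replace]
  simp only [List.isEmpty_cons, Bool.false_eq_true, if_false]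
  exact replace_go_single c cs.length cs [] (le_refl _)

theorem create_define_spec : Claim_equal_create_define := by
  intro name value _
  unfold Spec_create_define create_define create_define_alt pvSanitize
  simp only [List.foldl, replace_single, List.map_map]
  have hfun : ∀ (cs : List Char),
      cs.map ((fun x => if x = '-' then '_' else x) ∘ (fun x => if x = '\\' then '_' else x) ∘
        (fun x => if x = ']' then '_' else x) ∘ (fun x => if x = '[' then '_' else x) ∘
        (fun x => if x = ')' then '_' else x) ∘ (fun x => if x = '(' then '_' else x) ∘
        (fun x => if x = '/' then '_' else x) ∘ (fun x => if x = ' ' then '_' else x) ∘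
        (fun x => if x = '=' then '_' else x)) =
      cs.map (fun c =>
        if (PySem.Set.ofList (['=', ' ', '/', '(', ')', '[', ']', '\\', '-'] : List Char)).contains c
        then '_' else c) := by
    intro cs
    apply List.map_congr_left
    intro x _
    rw [show PySem.Set.ofList (['=',' ','/','(',')','[',']','\\','-'] : List Char) =
        ['=',' ','/','(',')','[',']','\\','-'] from by decide]
    by_cases hx : x ∈ (['=',' ','/','(',')','[',']','\\','-'] : List Char)
    · simp only [List.mem_cons, List.not_mem_nil, or_false] at hx
      rcases hx with rfl|rfl|rfl|rfl|rfl|rfl|rfl|rfl|rfl <;> decide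
    · have hc : PySem.Set.contains (['=',' ','/','(',')','[',']','\\','-'] : List Char) x = false := by
        simp [PySem.Set.contains, hx]
      simp only [List.mem_cons, List.not_mem_nil, or_false, not_or] at hx
      obtain ⟨n1,n2,n3,n4,n5,n6,n7,n8,n9⟩ := hx
      simp [Function.comp, hc, n1,n2,n3,n4,n5,n6,n7,n8,n9]
  rw [hfun name.toList, hfun value.toList]
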